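-- pv_equiv track=rewrite | github.com/peterpanstechland/DKUScope | software/python/control_station/reconstruction_service.py | _is_full_rectangle
-- ===== SOURCE A (Python) =====
-- from typing import Dict, List, Tuple, Set
--
-- def _is_full_rectangle(
--     component: List[Tuple[int, int]],
--     bbox: Tuple[int, int, int, int],
-- ) -> bool:
--     min_r, max_r, min_c, max_c = bbox
--     comp_set = set(component)
--
--     for r in range(min_r, max_r + 1):
--         for c in range(min_c, max_c + 1):
--             if (r, c) not in comp_set:
--                 return False
--     return True
-- ===== SOURCE B (Python) =====
-- def _is_full_rectangle(component, bbox):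
--     min_r, max_r, min_c, max_c = bbox
--     h = max_r - min_r + 1
--     w = max_c - min_c + 1
--     if h <= 0 or w <= 0:
--         return True
--     inside = {(r, c) for (r, c) in component
--               if min_r <= r <= max_r and min_c <= c <= max_c}
--     return len(inside) == h * w
-- ===== Notes on version B (the rewrite author's own statement) =====
-- stated objective: faster
-- what changed: Replaced the O(area) scan of every bounding-box cell with an O(n) counting argument: collect the distinct component cells lying inside the bbox and compare their count with the bbox area.
import Mathlib
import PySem

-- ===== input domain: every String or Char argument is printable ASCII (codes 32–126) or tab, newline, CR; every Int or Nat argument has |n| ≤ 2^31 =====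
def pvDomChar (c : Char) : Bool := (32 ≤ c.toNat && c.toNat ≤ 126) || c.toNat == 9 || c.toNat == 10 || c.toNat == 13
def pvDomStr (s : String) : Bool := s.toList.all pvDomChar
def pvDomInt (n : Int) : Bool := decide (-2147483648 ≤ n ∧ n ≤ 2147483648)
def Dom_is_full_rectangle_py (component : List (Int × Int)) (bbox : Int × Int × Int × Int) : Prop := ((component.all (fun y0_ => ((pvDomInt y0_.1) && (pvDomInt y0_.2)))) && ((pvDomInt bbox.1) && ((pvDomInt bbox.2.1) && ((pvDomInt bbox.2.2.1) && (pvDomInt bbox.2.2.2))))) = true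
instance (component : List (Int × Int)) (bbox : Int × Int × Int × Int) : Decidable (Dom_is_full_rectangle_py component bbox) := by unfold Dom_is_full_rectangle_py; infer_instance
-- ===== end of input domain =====

-- B replaces A's O(area) cell-by-cell scan of the whole bounding box by an O(n) count:
-- the distinct component cells lying inside the bbox are counted and compared with the bbox area.

-- ===== PORT A =====
-- inner 'for c in range(min_c, max_c + 1)': early 'return False' on the first missing cell
def pv_colLoop (comp_set : PySem.Set (Int × Int)) (r c max_c : Int) : Bool :=
  if _h : c < max_c + 1 then
    if PySem.Set.contains comp_set (r, c) then pv_colLoop comp_set r (c + 1) max_c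
    else false
  else true
termination_by (max_c + 1 - c).toNat
decreasing_by omega

-- outer 'for r in range(min_r, max_r + 1)'
def pv_rowLoop (comp_set : PySem.Set (Int × Int)) (r max_r min_c max_c : Int) : Bool :=
  if _h : r < max_r + 1 then
    if pv_colLoop comp_set r min_c max_c then pv_rowLoop comp_set (r + 1) max_r min_c max_c
    else false
  else true
termination_by (max_r + 1 - r).toNat
decreasing_by omega

def is_full_rectangle_py (component : List (Int × Int)) (bbox : Int × Int × Int × Int) : Bool :=
  match bbox with
  | (min_r, max_r, min_c, max_c) =>
    let comp_set := PySem.Set.ofList component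
    pv_rowLoop comp_set min_r max_r min_c max_c

-- ===== PORT B =====
def is_full_rectangle_py_alt (component : List (Int × Int)) (bbox : Int × Int × Int × Int) : Bool :=
  match bbox with
  | (min_r, max_r, min_c, max_c) =>
    let h := max_r - min_r + 1
    let w := max_c - min_c + 1
    if h ≤ 0 ∨ w ≤ 0 then true
    else
      let inside := PySem.Set.ofList (component.filter fun p =>
        decide (min_r ≤ p.1 ∧ p.1 ≤ max_r ∧ min_c ≤ p.2 ∧ p.2 ≤ max_c))
      (inside.length : Int) == h * w

-- ===== PRECONDITION & SPEC =====
def Spec_is_full_rectangle_py (component : List (Int × Int)) (bbox : Int × Int × Int × Int) (out : Bool) : Prop := out = is_full_rectangle_py_alt component bbox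
instance (component : List (Int × Int)) (bbox : Int × Int × Int × Int) (out : Bool) : Decidable (Spec_is_full_rectangle_py component bbox out) := by unfold Spec_is_full_rectangle_py; infer_instance

-- ===== CLAIM (what is proved, stated in full; the proofs are below) =====
def Claim_equal_is_full_rectangle_py : Prop := ∀ (component : List (Int × Int)) (bbox : Int × Int × Int × Int), Dom_is_full_rectangle_py component bbox → Spec_is_full_rectangle_py component bbox (is_full_rectangle_py component bbox)

-- ===== LEMMAS AND PROOFS =====

-- The two early-return loops of A run to completion iff every cell of their range is present.
lemma colLoop_eq (s : PySem.Set (Int × Int)) (r c M : Int) :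
    pv_colLoop s r c M = ((PySem.List.pyRange c (M + 1) 1).all fun c' => PySem.Set.contains s (r, c')) := by
  fun_induction pv_colLoop with
  | case1 c h hc ih =>
    rw [PySem.List.pyRange_one_cons (by omega)]
    simp only [List.all_cons, hc, Bool.true_and, ih]
  | case2 c h hc =>
    rw [PySem.List.pyRange_one_cons (by omega)]
    simp only [List.all_cons, Bool.eq_false_iff.mpr hc, Bool.false_and]
  | case3 c h =>
    rw [PySem.List.pyRange_one_eq_nil (by omega)]; simp

lemma rowLoop_eq (s : PySem.Set (Int × Int)) (r M mc Mc : Int) :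
    pv_rowLoop s r M mc Mc = ((PySem.List.pyRange r (M + 1) 1).all fun r' =>
      (PySem.List.pyRange mc (Mc + 1) 1).all fun c' => PySem.Set.contains s (r', c')) := by
  fun_induction pv_rowLoop with
  | case1 r h hc ih =>
    rw [PySem.List.pyRange_one_cons (by omega)]
    simp only [List.all_cons, ih, ← colLoop_eq, hc, Bool.true_and]
  | case2 r h hc =>
    rw [PySem.List.pyRange_one_cons (by omega)]
    simp only [List.all_cons, ← colLoop_eq, Bool.eq_false_iff.mpr hc, Bool.false_and]
  | case3 r h =>
    rw [PySem.List.pyRange_one_eq_nil (by omega)]; simp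

-- A returns true iff every cell of the bounding box is a cell of the component.
lemma A_true_iff (component : List (Int × Int)) (mr Mr mc Mc : Int) :
    is_full_rectangle_py component (mr, Mr, mc, Mc) = true ↔
      ∀ r c : Int, mr ≤ r → r ≤ Mr → mc ≤ c → c ≤ Mc → (r, c) ∈ component := by
  simp only [is_full_rectangle_py]
  rw [rowLoop_eq]
  simp only [List.all_eq_true, PySem.List.mem_pyRange_one,
    PySem.Set.contains, List.contains_iff_mem, PySem.Set.mem_ofList]
  constructor
  · intro h r c h1 h2 h3 h4; exact h r ⟨h1, by omega⟩ c ⟨h3, by omega⟩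
  · intro h r hr c hc; exact h r c hr.1 (by omega) hc.1 (by omega)

-- On a nondegenerate bbox, B returns true iff the distinct in-box cells number h*w.
lemma B_true_iff (component : List (Int × Int)) (mr Mr mc Mc : Int)
    (hh : mr ≤ Mr) (hw : mc ≤ Mc) :
    is_full_rectangle_py_alt component (mr, Mr, mc, Mc) = true ↔
      ((PySem.Set.ofList (component.filter fun p =>
        decide (mr ≤ p.1 ∧ p.1 ≤ Mr ∧ mc ≤ p.2 ∧ p.2 ≤ Mc))).length : Int)
        = (Mr - mr + 1) * (Mc - mc + 1) := by
  simp only [is_full_rectangle_py_alt]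
  rw [if_neg (by omega)]
  simp

-- The counting argument: the distinct in-box cells are a subset of the bbox grid,
-- so their count equals the grid's cardinality iff they cover the whole grid.
lemma card_argument (component : List (Int × Int)) (mr Mr mc Mc : Int)
    (hh : mr ≤ Mr) (hw : mc ≤ Mc) :
    (((PySem.Set.ofList (component.filter fun p =>
        decide (mr ≤ p.1 ∧ p.1 ≤ Mr ∧ mc ≤ p.2 ∧ p.2 ≤ Mc))).length : Int)
        = (Mr - mr + 1) * (Mc - mc + 1)) ↔
      ∀ r c : Int, mr ≤ r → r ≤ Mr → mc ≤ c → c ≤ Mc → (r, c) ∈ component := by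
  set L := PySem.Set.ofList (component.filter fun p =>
        decide (mr ≤ p.1 ∧ p.1 ≤ Mr ∧ mc ≤ p.2 ∧ p.2 ≤ Mc)) with hL
  have hnd : L.Nodup := PySem.Set.nodup_ofList _
  have hmem : ∀ p : Int × Int, p ∈ L ↔
      p ∈ component ∧ mr ≤ p.1 ∧ p.1 ≤ Mr ∧ mc ≤ p.2 ∧ p.2 ≤ Mc := by
    intro p
    rw [hL, PySem.Set.mem_ofList, List.mem_filter]
    simp
  set grid : Finset (Int × Int) := Finset.Icc mr Mr ×ˢ Finset.Icc mc Mc with hg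
  have hsub : L.toFinset ⊆ grid := by
    intro p hp
    rw [List.mem_toFinset, hmem] at hp
    simp [hg, Finset.mem_product, hp.2.1, hp.2.2.1, hp.2.2.2.1, hp.2.2.2.2]
  have hcardg : (grid.card : Int) = (Mr - mr + 1) * (Mc - mc + 1) := by
    rw [hg, Finset.card_product, Int.card_Icc, Int.card_Icc]
    push_cast [Int.toNat_of_nonneg (by omega : (0:Int) ≤ Mr + 1 - mr),
      Int.toNat_of_nonneg (by omega : (0:Int) ≤ Mc + 1 - mc)]
    ring
  have hlen : L.length = L.toFinset.card := (List.toFinset_card_of_nodup hnd).symm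
  constructor
  · intro hcard r c h1 h2 h3 h4
    have : L.toFinset = grid := by
      apply Finset.eq_of_subset_of_card_le hsub
      have h1 : (L.toFinset.card : Int) = (Mr - mr + 1) * (Mc - mc + 1) := by
        rw [← hlen]; exact hcard
      omega
    have : (r, c) ∈ L.toFinset := by
      rw [this]; simp [hg, Finset.mem_product, h1, h2, h3, h4]
    rw [List.mem_toFinset, hmem] at this
    exact this.1
  · intro hcov
    have : grid ⊆ L.toFinset := by
      intro p hp
      simp only [hg, Finset.mem_product, Finset.mem_Icc] at hp
      rw [List.mem_toFinset, hmem]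
      exact ⟨hcov p.1 p.2 hp.1.1 hp.1.2 hp.2.1 hp.2.2, hp.1.1, hp.1.2, hp.2.1, hp.2.2⟩
    have heq := Finset.Subset.antisymm hsub this
    rw [hlen, heq]
    exact hcardg

-- ===== VERDICT (by name: the statement is the Claim_ definition above) =====
theorem is_full_rectangle_py_spec : Claim_equal_is_full_rectangle_py := by
  intro component ⟨mr, Mr, mc, Mc⟩ _
  unfold Spec_is_full_rectangle_py
  by_cases hdeg : Mr < mr ∨ Mc < mc
  · have hB : is_full_rectangle_py_alt component (mr, Mr, mc, Mc) = true := by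
      simp only [is_full_rectangle_py_alt]; rw [if_pos (by omega)]
    rw [hB, A_true_iff]
    intro r c h1 h2 h3 h4; omega
  · simp only [not_or, not_lt] at hdeg
    rw [Bool.eq_iff_iff, A_true_iff, B_true_iff component mr Mr mc Mc hdeg.1 hdeg.2,
      card_argument component mr Mr mc Mc hdeg.1 hdeg.2]
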